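-- pv_equiv track=rewrite | github.com/getbeton/openclaw-gtm-skills | scripts/run_research_6sense_posthog.py | prioritize_urls
-- ===== SOURCE A (Python) =====
-- def prioritize_urls(urls: list[str], domain: str) -> list[str]:
--     priority = ["pricing", "about", "customers", "product", "solutions", "platform", "features", "team"]
--     def score(u):
--         u_low = u.lower()
--         for i, kw in enumerate(priority):
--             if kw in u_low:
--                 return i
--         return 99
--     return sorted(urls, key=score)[:8]
-- ===== SOURCE B (Python) =====
-- def prioritize_urls(urls: list[str], domain: str) -> list[str]:
--     priority = ["pricing", "about", "customers", "product", "solutions", "platform", "features", "team"]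
--     def score(u):
--         u_low = u.lower()
--         return next((i for i, kw in enumerate(priority) if kw in u_low), 99)
--     result = []
--     for target in list(range(len(priority))) + [99]:
--         result += [u for u in urls if score(u) == target]
--     return result[:8]
-- ===== Notes on version B (the rewrite author's own statement) =====
-- stated objective: alternative
-- what changed: Replaces the key-based comparison sort with a stable bucket grouping: for each possible score value in ascending order, collect the urls with that score in input order, then take the first 8; no sorting is performed.
import Mathlib
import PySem

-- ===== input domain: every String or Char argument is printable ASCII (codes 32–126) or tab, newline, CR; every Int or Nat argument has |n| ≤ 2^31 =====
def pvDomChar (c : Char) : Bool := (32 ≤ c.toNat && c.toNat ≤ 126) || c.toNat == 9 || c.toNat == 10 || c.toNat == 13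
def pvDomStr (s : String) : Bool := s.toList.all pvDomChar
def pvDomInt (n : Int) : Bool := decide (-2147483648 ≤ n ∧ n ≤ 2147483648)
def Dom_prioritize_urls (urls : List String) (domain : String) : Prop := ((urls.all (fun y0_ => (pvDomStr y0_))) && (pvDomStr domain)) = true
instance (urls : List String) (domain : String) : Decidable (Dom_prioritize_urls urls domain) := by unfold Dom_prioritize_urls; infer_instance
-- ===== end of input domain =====

-- B replaces the key-based sort by a stable bucket grouping over the 9 possible score values; objective: alternative (not measured faster).

-- ===== PORT A =====
def pvPriorityA : List String :=
  ["pricing", "about", "customers", "product", "solutions", "platform", "features", "team"]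

-- the 'for i, kw in enumerate(priority)' loop of score
def pvScoreLoopA (uLow : String) : List String → Int → Int
  | [], _ => 99
  | kw :: rest, i => if PySem.Str.isIn kw uLow then i else pvScoreLoopA uLow rest (i + 1)

def pvScoreA (u : String) : Int := pvScoreLoopA (PySem.Str.lower u) pvPriorityA 0

def prioritize_urls (urls : List String) (domain : String) : List String :=
  PySem.List.slice (PySem.List.sorted urls pvScoreA false) none (some 8)

-- ===== PORT B =====
-- (B uses the same literal keyword list; the constant pvPriorityA above is shared)
-- next((i for i, kw in enumerate(priority) if kw in u_low), 99)
def pvScoreB (u : String) : Int :=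
  match pvPriorityA.findIdx? (fun kw => PySem.Str.isIn kw (PySem.Str.lower u)) with
  | some i => (i : Int)
  | none => 99

def prioritize_urls_alt (urls : List String) (domain : String) : List String :=
  let targets : List Int := PySem.List.pyRange 0 (pvPriorityA.length : Int) 1 ++ [99]
  let result := targets.foldl (fun acc t => acc ++ urls.filter (fun u => pvScoreB u == t)) []
  PySem.List.slice result none (some 8)

-- ===== PRECONDITION & SPEC =====
def Spec_prioritize_urls (urls : List String) (domain : String) (out : List String) : Prop := out = prioritize_urls_alt urls domain
instance (urls : List String) (domain : String) (out : List String) : Decidable (Spec_prioritize_urls urls domain out) := by unfold Spec_prioritize_urls; infer_instance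

-- ===== CLAIM (what is proved, stated in full; the proofs are below) =====
def Claim_equal_prioritize_urls : Prop := ∀ (urls : List String) (domain : String), Dom_prioritize_urls urls domain → Spec_prioritize_urls urls domain (prioritize_urls urls domain)

-- ===== LEMMAS AND PROOFS =====

theorem pvScoreB_eq_A (u : String) : pvScoreB u = pvScoreA u := by
  simp only [pvScoreB, pvScoreA, pvPriorityA, pvPriorityA]
  simp only [List.findIdx?_cons, List.findIdx?_nil, pvScoreLoopA]
  split_ifs <;> simp

theorem pvScoreA_mem (u : String) : pvScoreA u ∈ ([0, 1, 2, 3, 4, 5, 6, 7, 99] : List Int) := by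
  simp only [pvScoreA, pvPriorityA, pvScoreLoopA]
  split_ifs <;> simp

theorem insertBy_skip {α : Type} (bf : α → α → Bool) (x : α) (l1 l2 : List α)
    (h : ∀ y ∈ l1, bf x y = false) :
    PySem.List.insertBy bf x (l1 ++ l2) = l1 ++ PySem.List.insertBy bf x l2 := by
  induction l1 with
  | nil => simp
  | cons a t ih =>
      simp only [List.cons_append, PySem.List.insertBy, h a (by simp)]
      simp [ih (fun y hy => h y (by simp [hy]))]

theorem insertBy_front {α : Type} (bf : α → α → Bool) (x : α) (l : List α)
    (h : ∀ y ∈ l, bf x y = true) :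
    PySem.List.insertBy bf x l = x :: l := by
  cases l with
  | nil => simp [PySem.List.insertBy]
  | cons a t => simp [PySem.List.insertBy, h a (by simp)]

theorem insert_flat {α : Type} (key : α → Int) (x : α) (vs : List Int)
    (hvs : vs.Pairwise (· < ·)) (hk : key x ∈ vs) (p : List α) :
    PySem.List.insertBy (fun a b => decide (key a < key b)) x
        (vs.flatMap fun v => p.filter fun y => key y == v)
      = vs.flatMap fun v => (p ++ [x]).filter fun y => key y == v := by
  induction vs with
  | nil => simp at hk
  | cons v rest ih =>
      have hlt : ∀ v' ∈ rest, v < v' := by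
        intro v' hv'; exact (List.pairwise_cons.mp hvs).1 v' hv'
      by_cases hx : key x = v
      · have hrest : key x ∉ rest := by
          intro hm; exact absurd (hlt _ hm) (by simp [hx])
        have h1 : ∀ y ∈ p.filter (fun y => key y == v), (fun a b => decide (key a < key b)) x y = false := by
          intro y hy
          have := (List.mem_filter.mp hy).2
          simp only [beq_iff_eq] at this
          simp [this, hx]
        rw [List.flatMap_cons, insertBy_skip _ _ _ _ h1,
          insertBy_front _ _ _ (by
            intro y hy
            simp only [List.mem_flatMap, List.mem_filter, beq_iff_eq] at hy
            obtain ⟨v', hv', _, hkey⟩ := hy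
            simp [hkey, hx, hlt v' hv'])]
        rw [List.flatMap_cons]
        have h2 : (p ++ [x]).filter (fun y => key y == v) = p.filter (fun y => key y == v) ++ [x] := by
          simp [List.filter_append, hx]
        have h3 : (rest.flatMap fun v' => (p ++ [x]).filter fun y => key y == v')
            = rest.flatMap fun v' => p.filter fun y => key y == v' := by
          apply List.flatMap_congr
          intro v' hv'
          have hne : key x ≠ v' := by have := hlt v' hv'; omega
          simp [List.filter_append, hne]
        rw [h2, h3]; simp
      · have hk' : key x ∈ rest := by
          rcases List.mem_cons.mp hk with h | h
          · exact absurd h hx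
          · exact h
        have hvgt : v < key x := hlt _ hk'
        have h1 : ∀ y ∈ p.filter (fun y => key y == v), (fun a b => decide (key a < key b)) x y = false := by
          intro y hy
          have := (List.mem_filter.mp hy).2
          simp only [beq_iff_eq] at this
          simp [this]; omega
        rw [List.flatMap_cons, insertBy_skip _ _ _ _ h1,
          ih (List.pairwise_cons.mp hvs).2 hk', List.flatMap_cons]
        have h2 : (p ++ [x]).filter (fun y => key y == v) = p.filter (fun y => key y == v) := by
          simp [List.filter_append, hx]
        rw [h2]

theorem foldl_flat {α : Type} (key : α → Int) (vs : List Int) (hvs : vs.Pairwise (· < ·))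
    (xs : List α) (p : List α) (hmem : ∀ x ∈ xs, key x ∈ vs) :
    xs.foldl (fun acc x => PySem.List.insertBy (fun a b => decide (key a < key b)) x acc)
        (vs.flatMap fun v => p.filter fun y => key y == v)
      = vs.flatMap fun v => (p ++ xs).filter fun y => key y == v := by
  induction xs generalizing p with
  | nil => simp
  | cons x t ih =>
      rw [List.foldl_cons, insert_flat key x vs hvs (hmem x (by simp)) p,
        ih (p ++ [x]) (fun y hy => hmem y (by simp [hy]))]
      simp

-- ===== VERDICT (by name: the statement is the Claim_ definition above) =====
theorem prioritize_urls_spec : Claim_equal_prioritize_urls := by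
  intro urls domain _
  unfold Spec_prioritize_urls prioritize_urls prioritize_urls_alt
  have ht : PySem.List.pyRange 0 (pvPriorityA.length : Int) 1 ++ [99] = ([0, 1, 2, 3, 4, 5, 6, 7, 99] : List Int) := by
    decide
  dsimp only
  rw [ht, PySem.List.foldl_append_eq_flatMap, List.nil_append]
  simp only [pvScoreB_eq_A]
  rw [PySem.List.sorted_eq_foldl_insertBy]
  have h0 : ([] : List String)
      = ([0, 1, 2, 3, 4, 5, 6, 7, 99] : List Int).flatMap
          (fun v => ([] : List String).filter fun y => pvScoreA y == v) := by
    simp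
  rw [h0, foldl_flat pvScoreA _ (by decide) urls [] (fun x _ => pvScoreA_mem x), List.nil_append]
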